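-- pv_equiv track=rewrite | github.com/mspachon/Prueba-de-Conocimiento-T-cnico | Problem 3 - Algorithms and Complexity.py | diferencia
-- ===== SOURCE A (Python) =====
-- def diferencia(matriz):
--     if len(matriz) < 2:
--         return "Sin Diferencia"
--
--     max_diferencia = matriz[1] - matriz[0]
--     max_num1 = matriz[0]
--     max_num2 = matriz[1]
--
--     for i in range(len(matriz)):
--         for j in range(i+1, len(matriz)):
--             diferencia = matriz[j] - matriz[i]
--             if diferencia > max_diferencia:
--                 max_diferencia = diferencia
--                 max_num1 = matriz[i]
--                 max_num2 = matriz[j]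
--
--     return f"{max_diferencia} (la maxima diferencia entre {max_num1} y {max_num2})"
--
-- matriz = [7, 2, 9, 5, 1, 6]
-- ===== SOURCE B (Python) =====
-- def diferencia(matriz):
--     # One pass: track the running minimum of the prefix; O(n) instead of O(n^2).
--     if len(matriz) < 2:
--         return "Sin Diferencia"
--     mejor = matriz[1] - matriz[0]
--     num1 = matriz[0]
--     num2 = matriz[1]
--     minimo = matriz[0]
--     for x in matriz[1:]:
--         if x - minimo > mejor:
--             mejor = x - minimo
--             num1 = minimo
--             num2 = x
--         if x < minimo:
--             minimo = x
--     return f"{mejor} (la maxima diferencia entre {num1} y {num2})"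
-- ===== Notes on version B (the rewrite author's own statement) =====
-- stated objective: faster
-- what changed: Replaces the nested all-pairs O(n^2) scan with a single pass over the list that tracks the running prefix minimum and updates the best difference and its pair on the fly.
import Mathlib
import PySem

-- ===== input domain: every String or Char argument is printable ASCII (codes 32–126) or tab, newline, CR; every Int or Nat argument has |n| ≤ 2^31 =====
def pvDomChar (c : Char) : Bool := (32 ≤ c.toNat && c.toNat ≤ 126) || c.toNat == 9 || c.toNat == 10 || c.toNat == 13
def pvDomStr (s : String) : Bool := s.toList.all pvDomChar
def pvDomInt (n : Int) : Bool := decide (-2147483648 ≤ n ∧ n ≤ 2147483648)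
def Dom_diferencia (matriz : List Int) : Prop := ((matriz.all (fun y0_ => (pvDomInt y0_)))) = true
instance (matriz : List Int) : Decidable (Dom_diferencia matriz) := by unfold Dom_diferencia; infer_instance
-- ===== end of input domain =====

-- B replaces A's nested all-pairs scan by a single pass tracking the running prefix minimum (O(n) instead of O(n^2)); the return value is proved identical.

-- ===== PORT A =====
-- every index fed to pyGetD below is in range (0 ≤ i < j < len), so pyGetD is exact for matriz[i]
def diferencia (matriz : List Int) : String :=
  if matriz.length < 2 then "Sin Diferencia"
  else
    let n := PySem.List.len matriz
    let r := (PySem.List.pyRange 0 n).foldl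
      (fun t i => (PySem.List.pyRange (i + 1) n).foldl
        (fun t j =>
          let d := PySem.List.pyGetD matriz j 0 - PySem.List.pyGetD matriz i 0
          if d > t.1 then (d, PySem.List.pyGetD matriz i 0, PySem.List.pyGetD matriz j 0) else t) t)
      (PySem.List.pyGetD matriz 1 0 - PySem.List.pyGetD matriz 0 0,
       PySem.List.pyGetD matriz 0 0, PySem.List.pyGetD matriz 1 0)
    PySem.Int.toStr r.1 ++ " (la maxima diferencia entre " ++ PySem.Int.toStr r.2.1 ++
      " y " ++ PySem.Int.toStr r.2.2 ++ ")"

-- ===== PORT B =====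
def diferencia_alt (matriz : List Int) : String :=
  if matriz.length < 2 then "Sin Diferencia"
  else
    let a0 := PySem.List.pyGetD matriz 0 0
    let a1 := PySem.List.pyGetD matriz 1 0
    let s := (PySem.List.slice matriz (some 1) none).foldl
      (fun (s : (Int × Int × Int) × Int) x =>
        (if x - s.2 > s.1.1 then (x - s.2, s.2, x) else s.1,
         if x < s.2 then x else s.2))
      ((a1 - a0, a0, a1), a0)
    PySem.Int.toStr s.1.1 ++ " (la maxima diferencia entre " ++ PySem.Int.toStr s.1.2.1 ++
      " y " ++ PySem.Int.toStr s.1.2.2 ++ ")"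

-- ===== PRECONDITION & SPEC =====
def Spec_diferencia (matriz : List Int) (out : String) : Prop := out = diferencia_alt matriz
instance (matriz : List Int) (out : String) : Decidable (Spec_diferencia matriz out) := by unfold Spec_diferencia; infer_instance

-- ===== CLAIM (what is proved, stated in full; the proofs are below) =====
def Claim_equal_diferencia : Prop := ∀ (matriz : List Int), Dom_diferencia matriz → Spec_diferencia matriz (diferencia matriz)

-- ===== LEMMAS AND PROOFS =====

-- element k of xs (all accesses are in range)
def FF (xs : List Int) (k : Nat) : Int := xs.getD k 0

-- A's strict "keep the first maximum" update
def updT (t c : Int × Int × Int) : Int × Int × Int := if c.1 > t.1 then c else t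

-- A's nested loop, re-indexed over Nat
def ANat (xs : List Int) : Int × Int × Int :=
  (List.range xs.length).foldl
    (fun t i => (List.range' (i + 1) (xs.length - (i + 1))).foldl
      (fun t j => updT t (FF xs j - FF xs i, FF xs i, FF xs j)) t)
    (FF xs 1 - FF xs 0, FF xs 0, FF xs 1)

-- B's single-pass step, re-indexed over Nat
def stepB (xs : List Int) (s : (Int × Int × Int) × Int) (j : Nat) : (Int × Int × Int) × Int :=
  (updT s.1 (FF xs j - s.2, s.2, FF xs j), if FF xs j < s.2 then FF xs j else s.2)

def BNat (xs : List Int) : (Int × Int × Int) × Int :=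
  (List.range' 1 (xs.length - 1)).foldl (stepB xs)
    ((FF xs 1 - FF xs 0, FF xs 0, FF xs 1), FF xs 0)

-- minimum of xs[0..k]
def pmin (xs : List Int) : Nat → Int
  | 0 => FF xs 0
  | k + 1 => min (pmin xs k) (FF xs (k + 1))

lemma pmin_le (xs : List Int) {i k : Nat} (h : i ≤ k) : pmin xs k ≤ FF xs i := by
  induction k with
  | zero =>
    have h0 : i = 0 := Nat.le_zero.mp h
    subst h0; exact le_of_eq rfl
  | succ k ih =>
    rcases Nat.lt_or_ge i (k+1) with hlt | hge
    · exact le_trans (min_le_left _ _) (ih (by omega))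
    · have hik : i = k + 1 := by omega
      subst hik; exact min_le_right _ _

lemma pmin_exists (xs : List Int) (k : Nat) : ∃ i, i ≤ k ∧ FF xs i = pmin xs k := by
  induction k with
  | zero => exact ⟨0, le_refl _, rfl⟩
  | succ k ih =>
    rcases ih with ⟨i, hi, hfi⟩
    by_cases h : pmin xs k ≤ FF xs (k+1)
    · exact ⟨i, by omega, by rw [hfi]; exact (min_eq_left h).symm⟩
    · exact ⟨k+1, le_refl _, (min_eq_right (by omega)).symm⟩

lemma pmin_anti (xs : List Int) {k k' : Nat} (h : k ≤ k') : pmin xs k' ≤ pmin xs k := by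
  induction k' with
  | zero =>
    have h0 : k = 0 := Nat.le_zero.mp h
    subst h0; exact le_of_eq rfl
  | succ k' ih =>
    rcases Nat.lt_or_ge k (k'+1) with hlt | hge
    · exact le_trans (min_le_left _ _) (ih (by omega))
    · have hk : k = k' + 1 := by omega
      subst hk; exact le_of_eq rfl

-- invariant of B's pass after consuming xs[1..k]
def PropB (xs : List Int) (k : Nat) (s : (Int × Int × Int) × Int) : Prop :=
  s.2 = pmin xs k ∧
  ∃ j, 1 ≤ j ∧ j ≤ k ∧ s.1 = (FF xs j - pmin xs (j-1), pmin xs (j-1), FF xs j) ∧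
    (∀ j', 1 ≤ j' → j' ≤ k → FF xs j' - pmin xs (j'-1) ≤ s.1.1) ∧
    (∀ j', 1 ≤ j' → j' < j → FF xs j' - pmin xs (j'-1) < s.1.1)

lemma stepB_propB (xs : List Int) {k : Nat} (hk : 1 ≤ k) {s} (h : PropB xs k s) :
    PropB xs (k+1) (stepB xs s (k+1)) := by
  obtain ⟨hm, j, hj1, hjk, ht, hle, hlt⟩ := h
  have hmin : (if FF xs (k+1) < s.2 then FF xs (k+1) else s.2) = pmin xs (k+1) := by
    rw [hm]
    show _ = min (pmin xs k) (FF xs (k+1))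
    split_ifs with h1
    · exact (min_eq_right (le_of_lt h1)).symm
    · exact (min_eq_left (by omega)).symm
  have hred : pmin xs (k + 1 - 1) = pmin xs k := by norm_num
  by_cases hc : FF xs (k+1) - s.2 > s.1.1
  · refine ⟨hmin, k+1, by omega, le_refl _, ?_, ?_, ?_⟩
    · show updT s.1 (FF xs (k+1) - s.2, s.2, FF xs (k+1)) = _
      rw [updT, if_pos hc, hm]
      simp
    · intro j' h1 h2
      show _ ≤ (updT s.1 (FF xs (k+1) - s.2, s.2, FF xs (k+1))).1
      rw [updT, if_pos hc, hm]
      rcases Nat.lt_or_ge j' (k+1) with hj' | hj'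
      · have := hle j' h1 (by omega)
        omega
      · have : j' = k + 1 := by omega
        subst this; omega
    · intro j' h1 h2
      show _ < (updT s.1 (FF xs (k+1) - s.2, s.2, FF xs (k+1))).1
      rw [updT, if_pos hc, hm]
      have := hle j' h1 (by omega)
      omega
  · refine ⟨hmin, j, hj1, by omega, ?_, ?_, ?_⟩
    · show updT s.1 (FF xs (k+1) - s.2, s.2, FF xs (k+1)) = _
      rw [updT, if_neg hc]
      exact ht
    · intro j' h1 h2
      show _ ≤ (updT s.1 (FF xs (k+1) - s.2, s.2, FF xs (k+1))).1
      rw [updT, if_neg hc]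
      rcases Nat.lt_or_ge j' (k+1) with hj' | hj'
      · exact hle j' h1 (by omega)
      · have : j' = k + 1 := by omega
        subst this; rw [hm] at hc; omega
    · intro j' h1 h2
      show _ < (updT s.1 (FF xs (k+1) - s.2, s.2, FF xs (k+1))).1
      rw [updT, if_neg hc]
      exact hlt j' h1 h2

lemma B_inv (xs : List Int) (k : Nat) (hk : 1 ≤ k) :
    PropB xs k ((List.range' 1 k).foldl (stepB xs)
      ((FF xs 1 - FF xs 0, FF xs 0, FF xs 1), FF xs 0)) := by
  induction k, hk using Nat.le_induction with
  | base =>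
    have hr : List.range' 1 1 = [1] := rfl
    rw [hr]
    show PropB xs 1 (stepB xs ((FF xs 1 - FF xs 0, FF xs 0, FF xs 1), FF xs 0) 1)
    have hupd : updT (FF xs 1 - FF xs 0, FF xs 0, FF xs 1)
        (FF xs 1 - FF xs 0, FF xs 0, FF xs 1) = (FF xs 1 - FF xs 0, FF xs 0, FF xs 1) := by
      rw [updT]; simp
    refine ⟨?_, 1, le_refl _, le_refl _, ?_, ?_, ?_⟩
    · show (if FF xs 1 < FF xs 0 then FF xs 1 else FF xs 0) = min (pmin xs 0) (FF xs 1)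
      show _ = min (FF xs 0) (FF xs 1)
      split_ifs with h1
      · exact (min_eq_right (le_of_lt h1)).symm
      · exact (min_eq_left (by omega)).symm
    · show updT _ _ = _
      rw [hupd]
      norm_num [pmin]
    · intro j' h1 h2
      have : j' = 1 := by omega
      subst this
      show _ ≤ (updT _ _).1
      rw [hupd]
      norm_num [pmin]
    · intro j' h1 h2
      omega
  | succ k hk ih =>
    rw [List.range'_concat, List.foldl_append, List.foldl_cons, List.foldl_nil]
    have h1k : 1 + 1 * k = k + 1 := by omega
    rw [h1k]
    exact stepB_propB xs hk ih

-- pairs already processed by A when its frontier is at (i, j)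
def Proc (n i j p q : Nat) : Prop := p < q ∧ q < n ∧ (p < i ∨ (p = i ∧ q ≤ j))

-- invariant of A's nested loop at frontier (i, j)
def InvA (xs : List Int) (n i j : Nat) (t : Int × Int × Int) : Prop :=
  ∃ p q, p < q ∧ q < n ∧ ((p = 0 ∧ q = 1) ∨ Proc n i j p q) ∧
    t = (FF xs q - FF xs p, FF xs p, FF xs q) ∧
    (∀ p' q', Proc n i j p' q' → FF xs q' - FF xs p' ≤ t.1) ∧
    (∀ p' q', Proc n i j p' q' → (p' < p ∨ (p' = p ∧ q' < q)) → FF xs q' - FF xs p' < t.1)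

lemma invA_step (xs : List Int) {n i j : Nat} (hij : i ≤ j) (hjn : j + 1 < n) {t}
    (h : InvA xs n i j t) :
    InvA xs n i (j+1) (updT t (FF xs (j+1) - FF xs i, FF xs i, FF xs (j+1))) := by
  obtain ⟨p, q, hpq, hqn, hdisj, ht, hle, hlt⟩ := h
  by_cases hc : FF xs (j+1) - FF xs i > t.1
  · refine ⟨i, j+1, by omega, hjn, Or.inr ⟨by omega, hjn, Or.inr ⟨rfl, le_refl _⟩⟩, ?_, ?_, ?_⟩
    · rw [updT, if_pos hc]
    · intro p' q' hproc
      obtain ⟨h1, h2, h3⟩ := hproc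
      rw [updT, if_pos hc]
      rcases h3 with h3 | ⟨h3, h4⟩
      · have := hle p' q' ⟨h1, h2, Or.inl h3⟩
        omega
      · subst h3
        rcases Nat.lt_or_ge q' (j+1) with h5 | h5
        · have := hle p' q' ⟨h1, h2, Or.inr ⟨rfl, by omega⟩⟩
          omega
        · have : q' = j + 1 := by omega
          subst this; omega
    · intro p' q' hproc hlex
      obtain ⟨h1, h2, h3⟩ := hproc
      rw [updT, if_pos hc]
      have hold : Proc n i j p' q' := by
        refine ⟨h1, h2, ?_⟩
        omega
      have := hle p' q' hold
      omega
  · refine ⟨p, q, hpq, hqn, ?_, ?_, ?_, ?_⟩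
    · rcases hdisj with h01 | ⟨h1, h2, h3⟩
      · exact Or.inl h01
      · exact Or.inr ⟨h1, h2, by omega⟩
    · rw [updT, if_neg hc]; exact ht
    · intro p' q' hproc
      obtain ⟨h1, h2, h3⟩ := hproc
      rw [updT, if_neg hc]
      rcases h3 with h3 | ⟨h3, h4⟩
      · exact hle p' q' ⟨h1, h2, Or.inl h3⟩
      · subst h3
        rcases Nat.lt_or_ge q' (j+1) with h5 | h5
        · exact hle p' q' ⟨h1, h2, Or.inr ⟨rfl, by omega⟩⟩
        · have : q' = j + 1 := by omega
          subst this; omega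
    · intro p' q' hproc hlex
      obtain ⟨h1, h2, h3⟩ := hproc
      rw [updT, if_neg hc]
      have hold : Proc n i j p' q' := by
        refine ⟨h1, h2, ?_⟩
        rcases h3 with h3 | ⟨h3, h4⟩
        · exact Or.inl h3
        · subst h3
          rcases Nat.lt_or_ge q' (j+1) with h5 | h5
          · exact Or.inr ⟨rfl, by omega⟩
          · -- q' = j+1 and (p',q') = (i,j+1) is lex-smaller than (p,q): impossible
            exfalso
            have hq' : q' = j + 1 := by omega
            subst hq'
            rcases hdisj with ⟨hp0, hq1⟩ | ⟨h6, h7, h8⟩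
            · omega
            · omega
      exact hlt p' q' hold hlex

lemma invA_inner (xs : List Int) {n i : Nat} : ∀ (m j : Nat), i ≤ j → j + m < n → ∀ {t}, InvA xs n i j t →
    InvA xs n i (j+m) ((List.range' (j+1) m).foldl
      (fun t j' => updT t (FF xs j' - FF xs i, FF xs i, FF xs j')) t) := by
  intro m
  induction m with
  | zero => intro j _ _ t h; simpa using h
  | succ m ih =>
    intro j hij hjm t h
    rw [List.range'_succ, List.foldl_cons]
    have h1 := invA_step xs hij (by omega) h
    have h2 := ih (j+1) (by omega) (by omega) h1
    have heq : j + (m + 1) = (j + 1) + m := by omega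
    rw [heq]
    exact h2

lemma Proc_iff {n i p q : Nat} (hn : 1 ≤ n) : Proc n i (n-1) p q ↔ Proc n (i+1) (i+1) p q := by
  simp only [Proc]; omega

lemma invA_shift (xs : List Int) {n i : Nat} (hn : 1 ≤ n) {t}
    (h : InvA xs n i (n-1) t) : InvA xs n (i+1) (i+1) t := by
  obtain ⟨p, q, hpq, hqn, hdisj, ht, hle, hlt⟩ := h
  refine ⟨p, q, hpq, hqn, ?_, ht, ?_, ?_⟩
  · rcases hdisj with h01 | hproc
    · exact Or.inl h01
    · exact Or.inr ((Proc_iff hn).mp hproc)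
  · intro p' q' hproc
    exact hle p' q' ((Proc_iff hn).mpr hproc)
  · intro p' q' hproc hlex
    exact hlt p' q' ((Proc_iff hn).mpr hproc) hlex

lemma invA_outer (xs : List Int) {n : Nat} (hn : n = xs.length) (h2 : 2 ≤ n) :
    ∀ i, i ≤ n → InvA xs n i i ((List.range i).foldl
      (fun t i' => (List.range' (i'+1) (xs.length - (i'+1))).foldl
        (fun t j => updT t (FF xs j - FF xs i', FF xs i', FF xs j)) t)
      (FF xs 1 - FF xs 0, FF xs 0, FF xs 1)) := by
  subst hn
  intro i
  induction i with
  | zero =>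
    intro _
    refine ⟨0, 1, by omega, by omega, Or.inl ⟨rfl, rfl⟩, rfl, ?_, ?_⟩
    · intro p' q' hproc
      exfalso; obtain ⟨h1, h2, h3⟩ := hproc; omega
    · intro p' q' hproc _
      exfalso; obtain ⟨h1, h2, h3⟩ := hproc; omega
  | succ i ih =>
    intro hin
    rw [List.range_succ, List.foldl_append, List.foldl_cons, List.foldl_nil]
    have hI := ih (by omega)
    have h1 := invA_inner xs (xs.length - (i+1)) i (le_refl _) (by omega) hI
    have heq : i + (xs.length - (i+1)) = xs.length - 1 := by omega
    rw [heq] at h1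
    exact invA_shift xs (by omega) h1

-- the two invariants force the same triple
lemma final_eq (xs : List Int) {n : Nat} (hn : n = xs.length) (h2 : 2 ≤ n)
    {tA sB} (hA : InvA xs n n n tA) (hB : PropB xs (n-1) sB) : tA = sB.1 := by
  obtain ⟨p, q, hpq, hqn, _, htA, hle, hlt⟩ := hA
  obtain ⟨_, jB, hj1, hjk, htB, hble, hblt⟩ := hB
  have hq1 : 1 ≤ q := by omega
  have hjBn : jB < n := by omega
  have hple : pmin xs (q-1) ≤ FF xs p := pmin_le xs (by omega)
  have h3 : FF xs q - pmin xs (q-1) ≤ sB.1.1 := hble q hq1 (by omega)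
  obtain ⟨i0, hi0, hFi0⟩ := pmin_exists xs (jB - 1)
  have hi0jB : i0 < jB := by omega
  have h4 : FF xs jB - FF xs i0 ≤ tA.1 := hle i0 jB ⟨hi0jB, hjBn, Or.inl (by omega)⟩
  have htA1 : tA.1 = FF xs q - FF xs p := by rw [htA]
  have hsB1 : sB.1.1 = FF xs jB - pmin xs (jB-1) := by rw [htB]
  have hD : tA.1 = sB.1.1 := by omega
  have hFp : FF xs p = pmin xs (q-1) := by omega
  have hjBq : jB ≤ q := by
    by_contra h'
    have hql : q < jB := by omega
    have := hblt q hq1 hql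
    omega
  rcases eq_or_lt_of_le hjBq with heq | hltq
  · subst heq
    rw [htA, htB, hFp]
  · have hnotlex : ¬(i0 < p ∨ (i0 = p ∧ jB < q)) := by
      intro hlex
      have := hlt i0 jB ⟨hi0jB, hjBn, Or.inl (by omega)⟩ hlex
      omega
    have hpi0 : p < i0 := by
      rcases Nat.lt_trichotomy i0 p with h' | h' | h'
      · exact absurd (Or.inl h') hnotlex
      · exact absurd (Or.inr ⟨h', hltq⟩) hnotlex
      · exact h'
    have h5 : pmin xs (jB-1) ≤ FF xs p := pmin_le xs (by omega)
    have h6 : pmin xs (q-1) ≤ pmin xs (jB-1) := pmin_anti xs (by omega)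
    have hFp2 : FF xs p = pmin xs (jB-1) := by omega
    have hFq : FF xs q = FF xs jB := by omega
    rw [htA, htB, hFq, hFp2]

lemma ANat_eq_BNat (xs : List Int) (h2 : 2 ≤ xs.length) : ANat xs = (BNat xs).1 := by
  have hA := invA_outer xs rfl h2 xs.length (le_refl _)
  have hB := B_inv xs (xs.length - 1) (by omega)
  exact final_eq xs rfl h2 hA hB

-- a fold over a dropped suffix is the fold over its index range
lemma foldl_drop_getD {β : Type} (xs : List Int) (g : β → Int → β) (k : Nat) (s : β) :
    (xs.drop k).foldl g s = (List.range' k (xs.length - k)).foldl (fun s j => g s (xs.getD j 0)) s := by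
  have hmap : (List.range' k (xs.length - k)).map (fun j => xs.getD j 0) = xs.drop k := by
    apply List.ext_getElem
    · simp
    · intro i h1 h2
      simp only [List.getElem_map, List.getElem_range', List.getElem_drop]
      rw [List.getD_eq_getElem]
      · congr 1
        omega
      · simp at h1
        omega
  rw [← hmap, List.foldl_map]

-- bridges: the ports compute ANat / BNat
lemma bridgeA (xs : List Int) (h2 : ¬ xs.length < 2) :
    diferencia xs = PySem.Int.toStr (ANat xs).1 ++ " (la maxima diferencia entre " ++
      PySem.Int.toStr (ANat xs).2.1 ++ " y " ++ PySem.Int.toStr (ANat xs).2.2 ++ ")" := by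
  unfold diferencia
  rw [if_neg h2]
  have hg1 : PySem.List.pyGetD xs 1 0 = FF xs 1 := by
    rw [show (1 : Int) = ((1 : Nat) : Int) by norm_num, PySem.List.pyGetD_natCast]; rfl
  have hg0 : PySem.List.pyGetD xs 0 0 = FF xs 0 := by
    rw [show (0 : Int) = ((0 : Nat) : Int) by norm_num, PySem.List.pyGetD_natCast]; rfl
  have hfold : (PySem.List.pyRange 0 (PySem.List.len xs)).foldl
      (fun t i => (PySem.List.pyRange (i + 1) (PySem.List.len xs)).foldl
        (fun t j =>
          let d := PySem.List.pyGetD xs j 0 - PySem.List.pyGetD xs i 0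
          if d > t.1 then (d, PySem.List.pyGetD xs i 0, PySem.List.pyGetD xs j 0) else t) t)
      (PySem.List.pyGetD xs 1 0 - PySem.List.pyGetD xs 0 0,
       PySem.List.pyGetD xs 0 0, PySem.List.pyGetD xs 1 0) = ANat xs := by
    rw [hg0, hg1, PySem.List.len_eq, PySem.List.pyRange_zero_natCast, List.foldl_map, ANat]
    apply PySem.List.foldl_congr_mem
    intro t i' _
    have h1 : ((i' : Int) + 1) = ((i' + 1 : Nat) : Int) := by push_cast; ring
    rw [h1, PySem.List.pyRange_one, List.foldl_map]
    have hlen : (((xs.length : Nat) : Int) - ((i' + 1 : Nat) : Int)).toNat = xs.length - (i' + 1) := by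
      omega
    rw [hlen, List.range'_eq_map_range, List.foldl_map]
    apply PySem.List.foldl_congr_mem
    intro t k _
    have hc : ((i' + 1 : Nat) : Int) + (k : Int) = ((i' + 1 + k : Nat) : Int) := by push_cast; ring
    rw [hc, PySem.List.pyGetD_natCast, PySem.List.pyGetD_natCast]
    rfl
  simp only [hfold]

lemma bridgeB (xs : List Int) (h2 : ¬ xs.length < 2) :
    diferencia_alt xs = PySem.Int.toStr (BNat xs).1.1 ++ " (la maxima diferencia entre " ++
      PySem.Int.toStr (BNat xs).1.2.1 ++ " y " ++ PySem.Int.toStr (BNat xs).1.2.2 ++ ")" := by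
  unfold diferencia_alt
  rw [if_neg h2]
  have hfold : (PySem.List.slice xs (some 1) none).foldl
      (fun (s : (Int × Int × Int) × Int) x =>
        (if x - s.2 > s.1.1 then (x - s.2, s.2, x) else s.1,
         if x < s.2 then x else s.2))
      ((PySem.List.pyGetD xs 1 0 - PySem.List.pyGetD xs 0 0, PySem.List.pyGetD xs 0 0,
        PySem.List.pyGetD xs 1 0), PySem.List.pyGetD xs 0 0) = BNat xs := by
    rw [PySem.List.slice_from_one, ← List.drop_one, foldl_drop_getD]
    have hg : PySem.List.pyGetD xs 1 0 = FF xs 1 := by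
      rw [show (1 : Int) = ((1 : Nat) : Int) by norm_num, PySem.List.pyGetD_natCast]; rfl
    have hg0 : PySem.List.pyGetD xs 0 0 = FF xs 0 := by
      rw [show (0 : Int) = ((0 : Nat) : Int) by norm_num, PySem.List.pyGetD_natCast]; rfl
    rw [hg, hg0, BNat]
    rfl
  simp only [hfold]

-- ===== VERDICT (by name: the statement is the Claim_ definition above) =====
theorem diferencia_spec : Claim_equal_diferencia := by
  intro xs _
  unfold Spec_diferencia
  by_cases h2 : xs.length < 2
  · simp [diferencia, diferencia_alt, h2]
  · rw [bridgeA xs h2, bridgeB xs h2, ANat_eq_BNat xs (by omega)]
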